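-- pv_equiv track=rewrite | github.com/BioGeMT/miRBind_2.0 | code/gene_level_model/training/evaluate.py | infer_layer_norm_from_state_dict
-- ===== SOURCE A (Python) =====
-- def infer_layer_norm_from_state_dict(state_dict):
--     """Detect if model was trained with layer normalization by checking state_dict keys."""
--     layer_norm_indicators = [
--         'conv_layer_norm.weight',
--         'conv_layer_norm.bias',
--         'multi_head_attention.layer_norm.weight',
--         'multi_head_attention.output_layer_norm.weight',
--     ]
--
--     for key in state_dict.keys():
--         for indicator in layer_norm_indicators:
--             if indicator in key:
--                 return True
--
--     fc_keys = [k for k in state_dict.keys() if k.startswith('fc.')]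
--     if len(fc_keys) > 6:
--         return True
--
--     return False
-- ===== SOURCE B (Python) =====
-- def infer_layer_norm_from_state_dict(state_dict):
--     """Detect if model was trained with layer normalization by checking state_dict keys."""
--     layer_norm_indicators = [
--         'conv_layer_norm.weight',
--         'conv_layer_norm.bias',
--         'multi_head_attention.layer_norm.weight',
--         'multi_head_attention.output_layer_norm.weight',
--     ]
--     fc_count = 0
--     for key in state_dict.keys():
--         if any(ind in key for ind in layer_norm_indicators):
--             return True
--         if key.startswith('fc.'):
--             fc_count += 1
--     return fc_count > 6
-- ===== Notes on version B (the rewrite author's own statement) =====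
-- stated objective: simpler
-- what changed: One single pass over the keys with an fc-counter replaces A's nested indicator loop followed by a second comprehension scan building fc_keys.
import Mathlib
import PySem

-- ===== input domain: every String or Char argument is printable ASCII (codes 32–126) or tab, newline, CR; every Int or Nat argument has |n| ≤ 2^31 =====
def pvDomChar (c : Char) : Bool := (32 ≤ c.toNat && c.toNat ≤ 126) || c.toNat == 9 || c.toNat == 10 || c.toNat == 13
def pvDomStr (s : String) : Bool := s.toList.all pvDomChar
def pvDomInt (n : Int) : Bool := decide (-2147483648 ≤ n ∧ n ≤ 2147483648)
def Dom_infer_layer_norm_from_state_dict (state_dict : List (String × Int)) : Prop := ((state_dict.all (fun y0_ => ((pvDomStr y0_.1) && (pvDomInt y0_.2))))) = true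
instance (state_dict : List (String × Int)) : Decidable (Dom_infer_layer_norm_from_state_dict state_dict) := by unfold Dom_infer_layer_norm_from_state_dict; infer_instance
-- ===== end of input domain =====

-- B replaces A's two scans of the keys (nested indicator loop, then an fc_keys comprehension) by one single pass with an fc-counter; objective: simpler.


-- ===== PORT A =====
def pvIndicators : List String :=
  ["conv_layer_norm.weight",
   "conv_layer_norm.bias",
   "multi_head_attention.layer_norm.weight",
   "multi_head_attention.output_layer_norm.weight"]

-- the nested for-loops with early return, then the fc_keys comprehension and its length test
def infer_layer_norm_from_state_dict (state_dict : List (String × Int)) : Bool :=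
  if state_dict.any (fun kv => pvIndicators.any (fun ind => PySem.Str.isIn ind kv.1)) then
    true
  else
    let fc_keys := (state_dict.map Prod.fst).filter (fun k => PySem.Str.startswith k "fc.")
    if fc_keys.length > 6 then true else false

-- ===== PORT B =====
-- single pass: return true on an indicator hit, otherwise carry the fc-counter
def pvScan : List (String × Int) → Nat → Bool
  | [], fc_count => decide (fc_count > 6)
  | (k, _) :: rest, fc_count =>
    if pvIndicators.any (fun ind => PySem.Str.isIn ind k) then true
    else pvScan rest (if PySem.Str.startswith k "fc." then fc_count + 1 else fc_count)

def infer_layer_norm_from_state_dict_alt (state_dict : List (String × Int)) : Bool :=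
  pvScan state_dict 0

-- ===== PRECONDITION & SPEC =====
def Spec_infer_layer_norm_from_state_dict (state_dict : List (String × Int)) (out : Bool) : Prop := out = infer_layer_norm_from_state_dict_alt state_dict
instance (state_dict : List (String × Int)) (out : Bool) : Decidable (Spec_infer_layer_norm_from_state_dict state_dict out) := by unfold Spec_infer_layer_norm_from_state_dict; infer_instance

-- ===== CLAIM (what is proved, stated in full; the proofs are below) =====
def Claim_equal_infer_layer_norm_from_state_dict : Prop := ∀ (state_dict : List (String × Int)), Dom_infer_layer_norm_from_state_dict state_dict → Spec_infer_layer_norm_from_state_dict state_dict (infer_layer_norm_from_state_dict state_dict)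

-- ===== LEMMAS AND PROOFS =====
lemma pvScan_eq (sd : List (String × Int)) (c : Nat) :
    pvScan sd c =
      (sd.any (fun kv => pvIndicators.any (fun ind => PySem.Str.isIn ind kv.1)) ||
       decide (c + ((sd.map Prod.fst).filter (fun k => PySem.Str.startswith k "fc.")).length > 6)) := by
  induction sd generalizing c with
  | nil => simp [pvScan]
  | cons hd tl ih =>
    obtain ⟨k, v⟩ := hd
    by_cases h : (pvIndicators.any fun ind => PySem.Chars.isIn ind.toList k.toList) = true
    · simp [pvScan, h]
    · by_cases hg : PySem.Chars.startswith k.toList ['f','c','.'] = true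
      · simp [pvScan, h, hg, ih]
        rw [Nat.add_right_comm, Nat.add_assoc]
      · simp [pvScan, h, hg, ih]

-- ===== VERDICT (by name: the statement is the Claim_ definition above) =====
theorem infer_layer_norm_from_state_dict_spec : Claim_equal_infer_layer_norm_from_state_dict := by
  intro sd _
  unfold Spec_infer_layer_norm_from_state_dict infer_layer_norm_from_state_dict
    infer_layer_norm_from_state_dict_alt
  rw [pvScan_eq]
  by_cases h : (sd.any fun kv => pvIndicators.any fun ind => PySem.Chars.isIn ind.toList kv.1.toList) = true
  · simp [h]
  · by_cases h6 : 6 < ((sd.map Prod.fst).filter (fun k => PySem.Chars.startswith k.toList ['f','c','.'])).length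
    · simp [h, h6]
    · simp [h, h6]
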